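-- pv_equiv track=rewrite | github.com/lalit-b/poker | poker_hands.py | get_highest_paired_card_value
-- ===== SOURCE A (Python) =====
-- from collections import Counter
--
-- def get_highest_paired_card_value(cards, suits):
--     # Function to return the highest paired card value in a hand
--     # Example:
--     # ['5', '5', '6', '7', 'K'] = > 5
--     # ['K', 'K', 'T', 'T', '8'] = > 13
--     card_ranks = {'A': 14, 'K': 13, 'Q': 12, 'J': 11, 'T': 10, '9': 9,
--                   '8': 8, '7': 7, '6': 6, '5': 5, '4': 4, '3': 3, '2': 2, '1': 1}
--     highest = 0
--     count = Counter(cards)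
--     for card, value in count.items():
--         if value == 2 and card_ranks[card] > highest:
--             highest = card_ranks[card]
--     return highest
-- ===== SOURCE B (Python) =====
-- def get_highest_paired_card_value(cards, suits):
--     # Sort the hand, then scan it grouping equal adjacent cards; for each run of
--     # length exactly two, look up its rank and keep the maximum (0 if no pair).
--     card_ranks = {'A': 14, 'K': 13, 'Q': 12, 'J': 11, 'T': 10, '9': 9,
--                   '8': 8, '7': 7, '6': 6, '5': 5, '4': 4, '3': 3, '2': 2, '1': 1}
--
--     def best_of(s, best):
--         if not s:
--             return best
--         c = s[0]
--         run = 1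
--         while run < len(s) and s[run] == c:
--             run += 1
--         if run == 2:
--             r = card_ranks[c]
--             if r > best:
--                 best = r
--         return best_of(s[run:], best)
--
--     return best_of(sorted(cards), 0)
-- ===== Notes on version B (the rewrite author's own statement) =====
-- stated objective: alternative
-- what changed: Instead of building a Counter and scanning its items with a running maximum, B sorts the hand and scans it once with a run-length grouping recursion, looking up the rank only of runs of length exactly two and keeping the best.
import Mathlib
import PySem

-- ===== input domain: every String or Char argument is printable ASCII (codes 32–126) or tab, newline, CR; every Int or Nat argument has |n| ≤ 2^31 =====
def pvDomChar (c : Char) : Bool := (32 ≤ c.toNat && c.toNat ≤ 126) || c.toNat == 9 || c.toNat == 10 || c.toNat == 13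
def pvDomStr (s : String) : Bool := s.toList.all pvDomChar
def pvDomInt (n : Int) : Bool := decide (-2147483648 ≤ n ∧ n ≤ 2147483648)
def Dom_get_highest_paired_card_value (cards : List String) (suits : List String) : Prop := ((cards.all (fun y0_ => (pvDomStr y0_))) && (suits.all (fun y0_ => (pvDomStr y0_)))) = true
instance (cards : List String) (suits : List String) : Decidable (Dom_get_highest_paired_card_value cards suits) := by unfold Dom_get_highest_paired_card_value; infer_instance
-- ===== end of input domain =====

-- B sorts the hand and scans it once with a run-length grouping recursion instead of A's Counter-items scan; objective: alternative.
-- ===== PORT A =====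
def pvCardRanks : PySem.Dict String Int :=
  PySem.Dict.ofList [("A", 14), ("K", 13), ("Q", 12), ("J", 11), ("T", 10), ("9", 9),
                     ("8", 8), ("7", 7), ("6", 6), ("5", 5), ("4", 4), ("3", 3), ("2", 2), ("1", 1)]

-- card_ranks[card] is ported as getD 0: exact wherever the lookup succeeds; Pre_ excludes the KeyError inputs.
def pvAStep (highest : Int) (p : String × Int) : Int :=
  if p.2 == 2 && decide (pvCardRanks.getD p.1 0 > highest) then pvCardRanks.getD p.1 0 else highest

def get_highest_paired_card_value (cards : List String) (suits : List String) : Int :=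
  ((PySem.Dict.counter cards).items).foldl pvAStep 0

-- ===== PORT B =====
-- Source B's best_of: head card c, run = length of the leading block of c's, recurse on the rest.
-- card_ranks[c] again ported as getD 0 (looked up only when run = 2, exactly as in Source B).
def pvBestOf : List String → Int → Int
  | [], best => best
  | c :: t, best =>
      let run : Nat := (t.takeWhile (fun x => x == c)).length + 1
      let best' : Int :=
        if run == 2 then
          let r := pvCardRanks.getD c 0
          if r > best then r else best
        else best
      pvBestOf (t.dropWhile (fun x => x == c)) best'
  termination_by s _ => s.length
  decreasing_by
    simpa using Nat.lt_succ_of_le (List.Sublist.length_le (List.dropWhile_sublist _))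

def get_highest_paired_card_value_alt (cards : List String) (suits : List String) : Int :=
  pvBestOf (PySem.List.sorted cards (fun x => x) false) 0

-- ===== PRECONDITION & SPEC =====
-- Pre_ excludes exactly the KeyError inputs (of both A and B): a card occurring exactly twice
-- that is not a card_ranks key.
def Pre_get_highest_paired_card_value (cards : List String) (suits : List String) : Prop :=
  ∀ c ∈ cards, cards.count c = 2 →
    c ∈ ["A", "K", "Q", "J", "T", "9", "8", "7", "6", "5", "4", "3", "2", "1"]
instance (cards : List String) (suits : List String) : Decidable (Pre_get_highest_paired_card_value cards suits) := by
  unfold Pre_get_highest_paired_card_value; infer_instance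

def pvWitness_get_highest_paired_card_value : List String × List String :=
  (["K", "K", "5", "5", "9"], ["h", "d", "s", "c", "h"])

def Spec_get_highest_paired_card_value (cards : List String) (suits : List String) (out : Int) : Prop :=
  out = get_highest_paired_card_value_alt cards suits
instance (cards : List String) (suits : List String) (out : Int) : Decidable (Spec_get_highest_paired_card_value cards suits out) := by
  unfold Spec_get_highest_paired_card_value; infer_instance

-- ===== CLAIM (what is proved, stated in full; the proofs are below) =====
def Claim_equal_get_highest_paired_card_value : Prop := ∀ (cards : List String) (suits : List String), Dom_get_highest_paired_card_value cards suits → Pre_get_highest_paired_card_value cards suits → Spec_get_highest_paired_card_value cards suits (get_highest_paired_card_value cards suits)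

-- ===== LEMMAS AND PROOFS =====

-- A's step function is a conditional max.
theorem pvAStep_eq (h0 : Int) (p : String × Int) :
    pvAStep h0 p = if p.2 = 2 then max h0 (pvCardRanks.getD p.1 0) else h0 := by
  unfold pvAStep
  by_cases h2 : p.2 = 2 <;> by_cases hgt : pvCardRanks.getD p.1 0 > h0 <;>
    simp [h2, hgt] <;> omega

-- A's fold as an upper-bound characterisation.
theorem pvAfold_le_iff (l : List (String × Int)) (h0 b : Int) :
    l.foldl pvAStep h0 ≤ b ↔ h0 ≤ b ∧ ∀ p ∈ l, p.2 = 2 → pvCardRanks.getD p.1 0 ≤ b := by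
  induction l generalizing h0 with
  | nil => simp
  | cons p t ih =>
    rw [List.foldl_cons, pvAStep_eq, ih]
    simp only [List.mem_cons]
    by_cases h2 : p.2 = 2
    · rw [if_pos h2]
      constructor
      · rintro ⟨h1, hall⟩
        refine ⟨le_trans (le_max_left _ _) h1, ?_⟩
        intro q hq hq2
        rcases hq with rfl | hq
        · exact le_trans (le_max_right _ _) h1
        · exact hall q hq hq2
      · rintro ⟨h1, hall⟩
        exact ⟨max_le h1 (hall p (Or.inl rfl) h2), fun q hq hq2 => hall q (Or.inr hq) hq2⟩
    · rw [if_neg h2]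
      constructor
      · rintro ⟨h1, hall⟩
        refine ⟨h1, fun q hq hq2 => ?_⟩
        rcases hq with rfl | hq
        · exact absurd hq2 h2
        · exact hall q hq hq2
      · rintro ⟨h1, hall⟩
        exact ⟨h1, fun q hq hq2 => hall q (Or.inr hq) hq2⟩

-- In a (≤)-sorted list with head c, the head's run has the full multiplicity of c …
theorem pvCount_head (c : String) (t : List String)
    (hs : (c :: t).Pairwise (· ≤ ·)) :
    (c :: t).count c = (t.takeWhile (fun x => x == c)).length + 1 := by
  have hsplit : t = t.takeWhile (fun x => x == c) ++ t.dropWhile (fun x => x == c) :=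
    (List.takeWhile_append_dropWhile).symm
  have htk : (t.takeWhile (fun x => x == c)).count c = (t.takeWhile (fun x => x == c)).length := by
    rw [List.count_eq_length]
    intro b hb
    have hp := List.mem_takeWhile_imp (p := fun x => x == c) hb
    have hb' : b = c := eq_of_beq hp
    simp [hb']
  have hdw : (t.dropWhile (fun x => x == c)).count c = 0 := by
    rw [List.count_eq_zero]
    intro hc
    cases hdweq : t.dropWhile (fun x => x == c) with
    | nil => rw [hdweq] at hc; exact absurd hc (List.not_mem_nil)
    | cons d r =>
      have hdne : ¬ (d == c) = true := by
        have := List.head?_dropWhile_not (fun x => x == c) t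
        rw [hdweq] at this; simpa using this
      have hdmem : d ∈ t := by
        have : d ∈ t.dropWhile (fun x => x == c) := by rw [hdweq]; exact List.mem_cons_self
        exact List.Sublist.subset (List.dropWhile_sublist _) this
      have hcd : c ≤ d := (List.pairwise_cons.1 hs).1 d hdmem
      have hpw : (d :: r).Pairwise (· ≤ ·) := by
        rw [← hdweq]
        exact (List.pairwise_cons.1 hs).2.sublist (List.dropWhile_sublist _)
      rw [hdweq] at hc
      rcases List.mem_cons.1 hc with rfl | hcr
      · exact hdne (by simp)
      · have hdc : d ≤ c := (List.pairwise_cons.1 hpw).1 c hcr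
        have : d = c := le_antisymm hdc hcd
        exact hdne (by simp [this])
  calc (c :: t).count c = t.count c + 1 := by rw [List.count_cons_self]
    _ = (t.takeWhile (fun x => x == c)).length + 1 := by
        conv_lhs => rw [hsplit]
        rw [List.count_append, htk, hdw]

-- … a different card has all its occurrences in the dropped rest …
theorem pvCount_other (c d : String) (t : List String) (hd : d ≠ c) :
    (c :: t).count d = (t.dropWhile (fun x => x == c)).count d := by
  have hsplit : t = t.takeWhile (fun x => x == c) ++ t.dropWhile (fun x => x == c) :=
    (List.takeWhile_append_dropWhile).symm
  have htk : (t.takeWhile (fun x => x == c)).count d = 0 := by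
    rw [List.count_eq_zero]
    intro hmem
    have := List.mem_takeWhile_imp hmem
    exact hd (by simpa using this)
  calc (c :: t).count d = t.count d := List.count_cons_of_ne (Ne.symm hd)
    _ = _ := by conv_lhs => rw [hsplit]; rw [List.count_append, htk, Nat.zero_add]

-- … and c itself does not occur in the rest.
theorem pvCount_rest_head (c : String) (t : List String)
    (hs : (c :: t).Pairwise (· ≤ ·)) :
    (t.dropWhile (fun x => x == c)).count c = 0 := by
  have h := pvCount_head c t hs
  have hsplit : t = t.takeWhile (fun x => x == c) ++ t.dropWhile (fun x => x == c) :=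
    (List.takeWhile_append_dropWhile).symm
  have : (c :: t).count c
      = (t.takeWhile (fun x => x == c)).count c + (t.dropWhile (fun x => x == c)).count c + 1 := by
    rw [List.count_cons_self]
    conv_lhs => rw [hsplit]
    rw [List.count_append]
  have htk : (t.takeWhile (fun x => x == c)).count c ≤ (t.takeWhile (fun x => x == c)).length :=
    List.count_le_length
  have htk' : (t.takeWhile (fun x => x == c)).count c = (t.takeWhile (fun x => x == c)).length := by
    rw [List.count_eq_length]
    intro b hb
    have hp := List.mem_takeWhile_imp (p := fun x => x == c) hb
    have hb' : b = c := eq_of_beq hp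
    simp [hb']
  omega

-- B's scan as the same upper-bound characterisation, over a sorted list.
theorem pvBestOf_le_iff (s : List String) (hs : s.Pairwise (· ≤ ·)) (best b : Int) :
    pvBestOf s best ≤ b ↔ best ≤ b ∧ ∀ c, s.count c = 2 → pvCardRanks.getD c 0 ≤ b := by
  induction hn : s.length using Nat.strong_induction_on generalizing s best with
  | _ n ih =>
    cases s with
    | nil => simp [pvBestOf]
    | cons c t =>
      have hrest : (t.dropWhile (fun x => x == c)).Pairwise (· ≤ ·) :=
        (List.pairwise_cons.1 hs).2.sublist (List.dropWhile_sublist _)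
      have hlen : (t.dropWhile (fun x => x == c)).length < n := by
        have := List.Sublist.length_le (List.dropWhile_sublist (l := t) (fun x => x == c))
        simp at hn; omega
      have ihr := ih _ hlen _ hrest
      rw [pvBestOf]
      simp only []
      rw [ihr _ rfl]
      constructor
      · rintro ⟨hb', hall⟩
        by_cases hrun : (t.takeWhile (fun x => x == c)).length + 1 = 2
        · simp only [hrun] at hb'
          simp at hb'
          refine ⟨by omega, ?_⟩
          intro d hd
          by_cases hdc : d = c
          · subst hdc; omega
          · exact hall d (by rw [← pvCount_other c d t hdc]; exact hd)
        · simp only [show ¬((t.takeWhile (fun x => x == c)).length + 1 == 2) = true by simpa using hrun,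
            Bool.false_eq_true, if_false] at hb'
          refine ⟨hb', ?_⟩
          intro d hd
          by_cases hdc : d = c
          · subst hdc
            rw [pvCount_head d t hs] at hd
            exact absurd hd hrun
          · exact hall d (by rw [← pvCount_other c d t hdc]; exact hd)
      · rintro ⟨hb', hall⟩
        by_cases hrun : (t.takeWhile (fun x => x == c)).length + 1 = 2
        · have hcnt : (c :: t).count c = 2 := by rw [pvCount_head c t hs]; exact hrun
          have hc := hall c hcnt
          simp only [hrun]
          refine ⟨by simp; split_ifs <;> omega, ?_⟩
          intro d hd
          by_cases hdc : d = c
          · subst hdc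
            rw [pvCount_rest_head d t hs] at hd; omega
          · exact hall d (by rw [pvCount_other c d t hdc]; exact hd)
        · simp only [show ¬((t.takeWhile (fun x => x == c)).length + 1 == 2) = true by simpa using hrun,
            Bool.false_eq_true, if_false]
          refine ⟨hb', ?_⟩
          intro d hd
          by_cases hdc : d = c
          · subst hdc
            rw [pvCount_rest_head d t hs] at hd; omega
          · exact hall d (by rw [pvCount_other c d t hdc]; exact hd)

-- The two characterisations coincide: A's items range over the distinct cards with their counts.
theorem pvA_le_iff (cards : List String) (b : Int) :
    get_highest_paired_card_value cards [] ≤ b ↔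
      0 ≤ b ∧ ∀ c, cards.count c = 2 → pvCardRanks.getD c 0 ≤ b := by
  unfold get_highest_paired_card_value
  rw [pvAfold_le_iff]
  refine and_congr_right fun _ => ?_
  constructor
  · intro hall c hc
    have hmem : c ∈ cards := List.count_pos_iff.1 (by omega)
    have hitem : (c, (cards.count c : Int)) ∈ (PySem.Dict.counter cards).items := by
      rw [PySem.Dict.items_counter]
      exact List.mem_map.2 ⟨c, (PySem.Set.mem_ofList _ _).2 hmem, rfl⟩
    have := hall _ hitem (by simp [hc])
    simpa using this
  · intro hall p hp h2
    rw [PySem.Dict.items_counter] at hp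
    rcases List.mem_map.1 hp with ⟨k, _, hkp⟩
    have hcnt : cards.count k = 2 := by
      have : ((cards.count k : Int)) = 2 := by rw [← hkp] at h2; simpa using h2
      exact_mod_cast this
    rw [← hkp]
    simpa using hall k hcnt

-- ===== VERDICT (by name: the statement is the Claim_ definition above) =====
theorem get_highest_paired_card_value_spec : Claim_equal_get_highest_paired_card_value := by
  intro cards suits _ _
  unfold Spec_get_highest_paired_card_value
  have hApre : ∀ b, get_highest_paired_card_value cards suits ≤ b ↔
      0 ≤ b ∧ ∀ c, cards.count c = 2 → pvCardRanks.getD c 0 ≤ b := by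
    intro b
    have : get_highest_paired_card_value cards suits = get_highest_paired_card_value cards [] := rfl
    rw [this, pvA_le_iff]
  have hBiff : ∀ b, get_highest_paired_card_value_alt cards suits ≤ b ↔
      0 ≤ b ∧ ∀ c, cards.count c = 2 → pvCardRanks.getD c 0 ≤ b := by
    intro b
    unfold get_highest_paired_card_value_alt
    rw [pvBestOf_le_iff _ (PySem.List.sorted_pairwise cards (fun x => x)) 0 b]
    refine and_congr_right fun _ => ?_
    have hperm : (PySem.List.sorted cards (fun x => x) false).Perm cards :=
      PySem.List.sorted_perm cards (fun x => x) false
    constructor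
    · intro hall c hc; exact hall c (by rw [hperm.count_eq]; exact hc)
    · intro hall c hc; exact hall c (by rw [← hperm.count_eq]; exact hc)
  have h1 : get_highest_paired_card_value cards suits ≤ get_highest_paired_card_value_alt cards suits := by
    rw [hApre]; rw [← hBiff]
  have h2 : get_highest_paired_card_value_alt cards suits ≤ get_highest_paired_card_value cards suits := by
    rw [hBiff]; rw [← hApre]
  omega
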